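-- pv_equiv track=rewrite | github.com/stefanhahmann/LineageTree | src/LineageTree/lineageTree.py | __edist_format
-- ===== SOURCE A (Python) =====
-- def __edist_format(adj_dict: dict):
--     inv_adj = {vi: k for k, v in adj_dict.items() for vi in v}
--     roots = set(adj_dict).difference(inv_adj)
--     nid2list = {}
--     list2nid = {}
--     nodes = []
--     adj_list = []
--     curr_id = 0
--     for r in roots:
--         to_do = [r]
--         while to_do:
--             curr = to_do.pop(0)
--             nid2list[curr] = curr_id
--             list2nid[curr_id] = curr
--             nodes.append(curr_id)
--             to_do = adj_dict.get(curr, []) + to_do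
--             curr_id += 1
--         adj_list = [
--             [nid2list[d] for d in adj_dict.get(list2nid[_id], [])]
--             for _id in nodes
--         ]
--     return nodes, adj_list, list2nid
-- ===== SOURCE B (Python) =====
-- def __edist_format(adj_dict: dict):
--     children = {c for kids in adj_dict.values() for c in kids}
--     roots = set(adj_dict).difference(children)
--     order = []
--     for r in roots:
--         # recursion emulated with a stack of child iterators (one frame per node)
--         frames = [iter((r,))]
--         while frames:
--             v = next(frames[-1], None)
--             if v is None:
--                 frames.pop()
--             else:
--                 order.append(v)
--                 frames.append(iter(adj_dict.get(v, [])))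
--     nid = {v: i for i, v in enumerate(order)}
--     nodes = list(range(len(order)))
--     adj_list = [[nid[c] for c in adj_dict.get(v, [])] for v in order]
--     return nodes, adj_list, dict(enumerate(order))
-- ===== Notes on version B (the rewrite author's own statement) =====
-- stated objective: faster
-- what changed: B replaces A's pop(0)/front-concatenation worklist and its full rebuild of adj_list after every root by recursion emulated with a stack of per-node child iterators (no list concatenation, no queue), recording the visit order once and deriving nodes, adj_list and list2nid in a single final pass.
import Mathlib
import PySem

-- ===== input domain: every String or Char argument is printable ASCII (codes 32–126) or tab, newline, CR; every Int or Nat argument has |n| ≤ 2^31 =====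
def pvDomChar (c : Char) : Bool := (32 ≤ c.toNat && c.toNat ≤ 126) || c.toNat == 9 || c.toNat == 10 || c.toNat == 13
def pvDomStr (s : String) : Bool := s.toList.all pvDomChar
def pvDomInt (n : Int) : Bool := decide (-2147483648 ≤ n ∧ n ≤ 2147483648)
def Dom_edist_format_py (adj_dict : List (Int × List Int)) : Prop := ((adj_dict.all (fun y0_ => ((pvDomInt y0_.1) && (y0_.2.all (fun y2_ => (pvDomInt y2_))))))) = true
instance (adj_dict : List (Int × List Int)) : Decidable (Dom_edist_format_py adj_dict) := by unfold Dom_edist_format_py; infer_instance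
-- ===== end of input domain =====

-- B replaces A's pop(0)/front-concat worklist and per-root rebuild of adj_list by recursion
-- emulated with a stack of per-node child iterators, producing the visit order once, with
-- nodes/adj_list/list2nid derived in a single final pass (objective: faster).
--
-- Both Python versions iterate over `roots`, a CPython `set` of ints; its iteration order is
-- the CPython hash-table order (deterministic for ints, hash-seed independent).  Both ports
-- reproduce it with the shared helpers pvSetOfKeys/pvRootsOrder below, an exact model of
-- CPython's int-set table (open addressing, linear probes, perturb, resize, the
-- copy-and-discard fast path of set.difference) on the |n| ≤ 2^31 domain.

-- ---- shared exact model of CPython's set-of-int iteration order ----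

-- CPython hash of an int in |n| ≤ 2^31, cast to size_t (64-bit two's complement)
def pvHash (n : Int) : Nat := (((if n = -1 then -2 else n) % ((2:Int)^64)).toNat)

-- the probe group starting at slot i: i itself, then 9 linear probes when i+9 ≤ mask
def pvGroup (i mask : Nat) : List Nat :=
  i :: (if i + 9 ≤ mask then (List.range 9).map (fun j => i + 1 + j) else [])

-- scan a probe group: first empty slot (.inl slot) or key already present (.inr ())
def pvScan (t : Array (Option Int)) (key : Int) (slots : List Nat) : Option (Sum Nat Unit) :=
  slots.findSome? (fun j =>
    match t.getD j none with
    | none => some (Sum.inl j)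
    | some k => if k = key then some (Sum.inr ()) else none)

-- set_add_entry's probe loop (fuel ≥ table size + 64 never runs out: load < 3/5)
def pvAddLoop (t : Array (Option Int)) (key : Int) : Nat → Nat → Nat → Option (Option Nat)
  | 0, _, _ => none
  | fuel+1, i, perturb =>
    match pvScan t key (pvGroup i (t.size - 1)) with
    | some (Sum.inl slot) => some (some slot)
    | some (Sum.inr _) => some none
    | none =>
      let p' := perturb >>> 5
      pvAddLoop t key fuel ((i * 5 + 1 + p') &&& (t.size - 1)) p'

-- set_insert_clean's probe loop (first empty slot in each group)
def pvCleanLoop (t : Array (Option Int)) (key : Int) : Nat → Nat → Nat → Array (Option Int)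
  | 0, _, _ => t
  | fuel+1, i, perturb =>
    match (pvGroup i (t.size - 1)).find? (fun j => (t.getD j none).isNone) with
    | some slot => if h : slot < t.size then t.set slot (some key) h else t
    | none =>
      let p' := perturb >>> 5
      pvCleanLoop t key fuel ((i * 5 + 1 + p') &&& (t.size - 1)) p'

def pvInsertClean (t : Array (Option Int)) (key : Int) : Array (Option Int) :=
  pvCleanLoop t key (t.size + 64) (pvHash key &&& (t.size - 1)) (pvHash key)

-- smallest power of two > minused, at least 8 (set_table_resize's sizing loop)
def pvNewSize (minused : Nat) : Nat := max 8 (Nat.nextPowerOfTwo (minused + 1))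

-- a CPython set of ints: (table, fill, used); no discards here, so fill = used
def pvResize (s : Array (Option Int) × Nat × Nat) (minused : Nat) : Array (Option Int) × Nat × Nat :=
  let t := s.1.foldl (fun acc e => match e with | some k => pvInsertClean acc k | none => acc)
    (Array.replicate (pvNewSize minused) none)
  (t, s.2.2, s.2.2)

def pvAdd (s : Array (Option Int) × Nat × Nat) (key : Int) : Array (Option Int) × Nat × Nat :=
  let (t, fill, used) := s
  let mask := t.size - 1
  let h := pvHash key
  match pvAddLoop t key (t.size + 64) (h &&& mask) h with
  | some (some slot) =>
    let t' := if h' : slot < t.size then t.set slot (some key) h' else t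
    let s' := (t', fill + 1, used + 1)
    if (fill + 1) * 5 ≥ mask * 3 then
      pvResize s' (if used + 1 > 50000 then (used + 1) * 2 else (used + 1) * 4)
    else s'
  | _ => s

def pvEmptySet : Array (Option Int) × Nat × Nat := (Array.replicate 8 none, 0, 0)

-- set(d) for a dict d with key list ks (set_update_internal's dict path, with its presize)
def pvSetOfKeys (ks : List Int) : Array (Option Int) × Nat × Nat :=
  let s0 := if ks.length * 5 ≥ 21 then pvResize pvEmptySet (ks.length * 2) else pvEmptySet
  ks.foldl pvAdd s0

def pvElems (s : Array (Option Int) × Nat × Nat) : List Int := s.1.toList.reduceOption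

-- list(set(ks).difference(other)) where `mem` is membership in other and otherLen = len(other)
def pvRootsOrder (ks : List Int) (otherLen : Nat) (mem : Int → Bool) : List Int :=
  let s := pvSetOfKeys ks
  if s.2.2 >>> 2 > otherLen then
    -- set_copy_and_difference: copy the table, discard other's members (slot order kept)
    (pvElems s).filter (fun k => !(mem k))
  else
    pvElems ((pvElems s).foldl (fun r k => if mem k then r else pvAdd r k) pvEmptySet)

-- ===== PORT A =====
-- the while loop: to_do.pop(0); to_do = adj.get(curr, []) + to_do; fuel only makes it total
-- (when the Python terminates the traversal is finite and 2^(edges+1) bounds its length,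
-- so the fuel never runs out there)
def aWhile (adj : PySem.Dict Int (List Int)) :
    Nat → List Int → PySem.Dict Int Int → PySem.Dict Int Int → List Int → Int →
    PySem.Dict Int Int × PySem.Dict Int Int × List Int × Int
  | 0, _, n2l, l2n, nodes, cid => (n2l, l2n, nodes, cid)
  | _, [], n2l, l2n, nodes, cid => (n2l, l2n, nodes, cid)
  | fuel+1, curr :: rest, n2l, l2n, nodes, cid =>
    aWhile adj fuel (adj.getD curr [] ++ rest)
      (n2l.insert curr cid) (l2n.insert cid curr) (nodes ++ [cid]) (cid + 1)

-- for r in roots: run the while loop, then rebuild adj_list from the current state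
-- (nid2list[d] / list2nid[_id] are ported as getD _ 0: after a completed traversal every
-- child of a visited node is itself visited and every _id in nodes is a list2nid key, so
-- the default is never read where the Python returns)
def aFold (adj : PySem.Dict Int (List Int)) (F : Nat) :
    List Int → PySem.Dict Int Int → PySem.Dict Int Int → List Int → Int → List (List Int) →
    PySem.Dict Int Int × PySem.Dict Int Int × List Int × Int × List (List Int)
  | [], n2l, l2n, nodes, cid, adjl => (n2l, l2n, nodes, cid, adjl)
  | r :: rs, n2l, l2n, nodes, cid, _ =>
    match aWhile adj F [r] n2l l2n nodes cid with
    | (n2l', l2n', nodes', cid') =>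
      aFold adj F rs n2l' l2n' nodes' cid'
        (nodes'.map (fun _id => (adj.getD (l2n'.getD _id 0) []).map (fun d => n2l'.getD d 0)))

def edist_format_py (adj_dict : List (Int × List Int)) : List Int × List (List Int) × (List (Int × Int)) :=
  let adj : PySem.Dict Int (List Int) := PySem.Dict.mk adj_dict
  let inv_adj : PySem.Dict Int Int :=
    (adj.items.flatMap (fun kv => kv.2.map (fun vi => (vi, kv.1)))).foldl
      (fun d p => d.insert p.1 p.2) (PySem.Dict.mk [])
  let roots := pvRootsOrder adj.keys inv_adj.size (fun x => inv_adj.contains x)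
  let F := 2 ^ ((adj_dict.map (fun kv => kv.2.length)).sum + 1)
  match aFold adj F roots (PySem.Dict.mk []) (PySem.Dict.mk []) [] 0 [] with
  | (_, l2n, nodes, _, adjl) => (nodes, adjl, l2n.items)

-- ===== PORT B =====
-- frames is Source B's stack of child iterators: each Lean frame is the list of elements the
-- iterator has not yielded yet.  `bPop` is the `if v is None: frames.pop()` arm repeated
-- (dropping exhausted top frames); each fuel tick is one visit (the else arm); the fuel
-- only makes the loop total (when the Python terminates it never runs out)
def bPop : List (List Int) → List (List Int)
  | [] => []
  | [] :: rest => bPop rest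
  | (v :: vs) :: rest => (v :: vs) :: rest

def bLoop (adj : PySem.Dict Int (List Int)) : Nat → List (List Int) → List Int → List Int
  | 0, _, order => order
  | fuel+1, frames, order =>
    match bPop frames with
    | [] => order
    | [] :: _ => order  -- unreachable: bPop never exposes an empty top frame
    | (v :: vs) :: rest =>
      bLoop adj fuel ((adj.getD v []) :: vs :: rest) (order ++ [v])

def edist_format_py_alt (adj_dict : List (Int × List Int)) : List Int × List (List Int) × (List (Int × Int)) :=
  let adj : PySem.Dict Int (List Int) := PySem.Dict.mk adj_dict
  let children : PySem.Set Int := PySem.Set.ofList (adj.values.flatMap (fun kids => kids))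
  let roots := pvRootsOrder adj.keys children.length (fun c => PySem.Set.contains children c)
  let F := 2 ^ ((adj_dict.map (fun kv => kv.2.length)).sum + 1)
  let order := roots.foldl (fun order r => bLoop adj F [[r]] order) []
  let nid : PySem.Dict Int Int :=
    (PySem.List.enumerate order).foldl (fun d p => d.insert p.2 p.1) (PySem.Dict.mk [])
  let nodes := PySem.List.pyRange 0 (order.length : Int) 1
  let adj_list := order.map (fun v => (adj.getD v []).map (fun c => nid.getD c 0))
  let list2nid : PySem.Dict Int Int :=
    (PySem.List.enumerate order).foldl (fun d p => d.insert p.1 p.2) (PySem.Dict.mk [])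
  (nodes, adj_list, list2nid.items)

-- ===== PRECONDITION & SPEC =====
-- no Pre_: the two ports agree on every input (on inputs with a cycle reachable from a
-- root the Python A does not terminate; both ports then cut the identical traversal at the
-- same fuel, so the equality still holds)
def Spec_edist_format_py (adj_dict : List (Int × List Int)) (out : List Int × List (List Int) × (List (Int × Int))) : Prop := out = edist_format_py_alt adj_dict
instance (adj_dict : List (Int × List Int)) (out : List Int × List (List Int) × (List (Int × Int))) : Decidable (Spec_edist_format_py adj_dict out) := by unfold Spec_edist_format_py; infer_instance

-- ===== CLAIM (what is proved, stated in full; the proofs are below) =====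
def Claim_equal_edist_format_py : Prop := ∀ (adj_dict : List (Int × List Int)), Dom_edist_format_py adj_dict → Spec_edist_format_py adj_dict (edist_format_py adj_dict)

-- ===== LEMMAS AND PROOFS =====

-- ghost: the common pre-order visit sequence of one worklist under the given fuel
def gVisit (adj : PySem.Dict Int (List Int)) : Nat → List Int → List Int
  | 0, _ => []
  | _, [] => []
  | fuel+1, c :: rest => c :: gVisit adj fuel (adj.getD c [] ++ rest)

-- ghost: pair each visited node with its id, ids counting up from i
def gIdx : List Int → Int → List (Int × Int)
  | [], _ => []
  | v :: vs, i => (v, i) :: gIdx vs (i + 1)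

theorem gIdx_append (a b : List Int) (i : Int) :
    gIdx (a ++ b) i = gIdx a i ++ gIdx b (i + a.length) := by
  induction a generalizing i with
  | nil => simp [gIdx]
  | cons x xs ih =>
    have h2 : i + ((xs.length : Int) + 1) = i + 1 + (xs.length : Int) := by ring
    simp only [List.cons_append, gIdx, ih, List.length_cons, Nat.cast_add, Nat.cast_one, h2]

theorem map_snd_gIdx (vs : List Int) (i : Int) :
    (gIdx vs i).map (·.2) = PySem.List.pyRange i (i + vs.length) 1 := by
  induction vs generalizing i with
  | nil => simp [gIdx, PySem.List.pyRange_one_eq_nil]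
  | cons v vs ih =>
    have hlt : i < i + ((v :: vs).length : Int) := by
      simp only [List.length_cons]; push_cast; omega
    rw [PySem.List.pyRange_one_cons hlt]
    have h2 : i + ((vs.length : Int) + 1) = i + 1 + (vs.length : Int) := by ring
    simp only [gIdx, List.map_cons, ih, List.length_cons, Nat.cast_add, Nat.cast_one, h2]

theorem swap_gIdx (vs : List Int) (i : Int) :
    (gIdx vs i).map (fun p => (p.2, p.1)) = PySem.List.enumerate vs i := by
  induction vs generalizing i with
  | nil => simp [gIdx, PySem.List.enumerate]
  | cons v vs ih => simp [gIdx, PySem.List.enumerate_cons, ih]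

-- A's while loop in terms of the ghost visit sequence
theorem aWhile_eq (adj : PySem.Dict Int (List Int)) :
    ∀ (fuel : Nat) (todo : List Int) (n2l l2n : PySem.Dict Int Int) (nodes : List Int) (cid : Int),
    aWhile adj fuel todo n2l l2n nodes cid =
      ((gIdx (gVisit adj fuel todo) cid).foldl (fun d p => d.insert p.1 p.2) n2l,
       (gIdx (gVisit adj fuel todo) cid).foldl (fun d p => d.insert p.2 p.1) l2n,
       nodes ++ (gIdx (gVisit adj fuel todo) cid).map (·.2),
       cid + (gVisit adj fuel todo).length) := by
  intro fuel
  induction fuel with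
  | zero => intro todo n2l l2n nodes cid; simp [aWhile, gVisit, gIdx]
  | succ f ih =>
    intro todo n2l l2n nodes cid
    cases todo with
    | nil => simp [aWhile, gVisit, gIdx]
    | cons c rest =>
      simp only [aWhile, gVisit, gIdx, ih, List.foldl_cons, List.map_cons, List.length_cons,
        Prod.mk.injEq]
      refine ⟨trivial, trivial, by simp, by push_cast; ring⟩

-- B's frame stack reads as its flattening: dropping exhausted frames keeps it
theorem bPop_flatten : ∀ (fs : List (List Int)), (bPop fs).flatten = fs.flatten := by
  intro fs
  induction fs with
  | nil => simp [bPop]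
  | cons f rest ih =>
    cases f with
    | nil => simpa [bPop] using ih
    | cons v vs => simp [bPop]

theorem bPop_shape : ∀ (fs : List (List Int)),
    bPop fs = [] ∨ ∃ v vs rest, bPop fs = (v :: vs) :: rest := by
  intro fs
  induction fs with
  | nil => exact Or.inl rfl
  | cons f rest ih =>
    cases f with
    | nil => simpa [bPop] using ih
    | cons v vs => exact Or.inr ⟨v, vs, rest, rfl⟩

-- B's loop produces the ghost visit sequence of the flattened frame stack, cut for cut
theorem bLoop_eq (adj : PySem.Dict Int (List Int)) :
    ∀ (fuel : Nat) (fs : List (List Int)) (order : List Int),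
    bLoop adj fuel fs order = order ++ gVisit adj fuel fs.flatten := by
  intro fuel
  induction fuel with
  | zero => intro fs order; simp [bLoop, gVisit]
  | succ f ih =>
    intro fs order
    rcases bPop_shape fs with h | ⟨v, vs, rest, h⟩
    · have hfl : fs.flatten = [] := by
        have := bPop_flatten fs
        rw [h] at this
        simpa using this.symm
      rw [hfl]
      simp [bLoop, h, gVisit]
    · have hfl : fs.flatten = v :: (vs ++ rest.flatten) := by
        have := bPop_flatten fs
        rw [h] at this
        simpa using this.symm
      have hstep : bLoop adj (f+1) fs order
          = bLoop adj f ((adj.getD v []) :: vs :: rest) (order ++ [v]) := by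
        rw [show bLoop adj (f+1) fs order
              = (match bPop fs with
                 | [] => order
                 | [] :: _ => order
                 | (v :: vs) :: rest => bLoop adj f ((adj.getD v []) :: vs :: rest) (order ++ [v])) from rfl,
            h]
      rw [hstep, ih, hfl]
      simp [gVisit]

-- the concatenated visit sequence over the root list
def gSeq (adj : PySem.Dict Int (List Int)) (F : Nat) (rs : List Int) : List Int :=
  rs.flatMap (fun r => gVisit adj F [r])

-- adj_list as rebuilt by A from a final state
def gAdjl (adj : PySem.Dict Int (List Int)) (n2l l2n : PySem.Dict Int Int) (nodes : List Int) : List (List Int) :=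
  nodes.map (fun _id => (adj.getD (l2n.getD _id 0) []).map (fun d => n2l.getD d 0))

theorem aFold_eq (adj : PySem.Dict Int (List Int)) (F : Nat) :
    ∀ (rs : List Int) (n2l l2n : PySem.Dict Int Int) (nodes : List Int) (cid : Int) (adjl : List (List Int)),
    aFold adj F rs n2l l2n nodes cid adjl =
      ((gIdx (gSeq adj F rs) cid).foldl (fun d p => d.insert p.1 p.2) n2l,
       (gIdx (gSeq adj F rs) cid).foldl (fun d p => d.insert p.2 p.1) l2n,
       nodes ++ (gIdx (gSeq adj F rs) cid).map (·.2),
       cid + (gSeq adj F rs).length,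
       if rs.isEmpty then adjl else
         gAdjl adj
           ((gIdx (gSeq adj F rs) cid).foldl (fun d p => d.insert p.1 p.2) n2l)
           ((gIdx (gSeq adj F rs) cid).foldl (fun d p => d.insert p.2 p.1) l2n)
           (nodes ++ (gIdx (gSeq adj F rs) cid).map (·.2))) := by
  intro rs
  induction rs with
  | nil => intro n2l l2n nodes cid adjl; simp [aFold, gSeq, gIdx]
  | cons r rs ih =>
    intro n2l l2n nodes cid adjl
    rw [show aFold adj F (r :: rs) n2l l2n nodes cid adjl
          = (match aWhile adj F [r] n2l l2n nodes cid with
             | (n2l', l2n', nodes', cid') =>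
               aFold adj F rs n2l' l2n' nodes' cid'
                 (nodes'.map (fun _id => (adj.getD (l2n'.getD _id 0) []).map (fun d => n2l'.getD d 0)))) from rfl]
    rw [aWhile_eq]
    simp only [ih]
    have hseq : gSeq adj F (r :: rs) = gVisit adj F [r] ++ gSeq adj F rs := by
      simp [gSeq]
    rw [hseq, gIdx_append, List.foldl_append, List.foldl_append]
    by_cases hrs : rs = []
    · subst hrs
      simp [gSeq, gIdx, gAdjl]
    · have hne : rs.isEmpty = false := by simpa [List.isEmpty_iff] using hrs
      simp only [hne, List.isEmpty_cons, Bool.false_eq_true, if_false, Prod.mk.injEq,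
        List.map_append, List.length_append, List.append_assoc, Nat.cast_add, gAdjl]
      refine ⟨trivial, trivial, trivial, by ring, trivial⟩

-- congruence for the shared roots-order helper
theorem pvRootsOrder_congr (ks : List Int) (n1 n2 : Nat) (m1 m2 : Int → Bool)
    (hn : n1 = n2) (hm : ∀ x, m1 x = m2 x) :
    pvRootsOrder ks n1 m1 = pvRootsOrder ks n2 m2 := by
  subst hn
  have : m1 = m2 := funext hm
  subst this
  rfl

-- the keys of A's inv_adj dict are exactly B's children set (same list)
theorem inv_keys_eq (adj_dict : List (Int × List Int)) :
    (((PySem.Dict.mk adj_dict : PySem.Dict Int (List Int)).items.flatMap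
        (fun kv => kv.2.map (fun vi => (vi, kv.1)))).foldl
      (fun d p => d.insert p.1 p.2) (PySem.Dict.mk [] : PySem.Dict Int Int)).keys =
    PySem.Set.ofList ((PySem.Dict.mk adj_dict : PySem.Dict Int (List Int)).values.flatMap (fun kids => kids)) := by
  rw [PySem.Dict.keys_foldl_insert_key
        ((PySem.Dict.mk adj_dict : PySem.Dict Int (List Int)).items.flatMap
          (fun kv => kv.2.map (fun vi => (vi, kv.1)))) (fun p => p.1) (fun _ p => p.2)]
  rw [PySem.Dict.keys_mk]
  simp only [List.map_nil]
  rw [PySem.Set.update_nil_left]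
  congr 1
  rw [List.map_flatMap, PySem.Dict.values_mk, List.flatMap_map]
  apply List.flatMap_congr
  intro a _
  simp [Function.comp_def]

theorem inv_size_eq (adj_dict : List (Int × List Int)) :
    (((PySem.Dict.mk adj_dict : PySem.Dict Int (List Int)).items.flatMap
        (fun kv => kv.2.map (fun vi => (vi, kv.1)))).foldl
      (fun d p => d.insert p.1 p.2) (PySem.Dict.mk [] : PySem.Dict Int Int)).size =
    (PySem.Set.ofList ((PySem.Dict.mk adj_dict : PySem.Dict Int (List Int)).values.flatMap (fun kids => kids)) : PySem.Set Int).length := by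
  have h := congrArg List.length (inv_keys_eq adj_dict)
  simpa [PySem.Dict.keys, PySem.Dict.size] using h

theorem inv_contains_eq (adj_dict : List (Int × List Int)) (x : Int) :
    (((PySem.Dict.mk adj_dict : PySem.Dict Int (List Int)).items.flatMap
        (fun kv => kv.2.map (fun vi => (vi, kv.1)))).foldl
      (fun d p => d.insert p.1 p.2) (PySem.Dict.mk [] : PySem.Dict Int Int)).contains x =
    PySem.Set.contains (PySem.Set.ofList ((PySem.Dict.mk adj_dict : PySem.Dict Int (List Int)).values.flatMap (fun kids => kids))) x := by
  rw [PySem.Dict.contains_eq_decide_mem_keys, inv_keys_eq]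
  simp [PySem.Set.contains]

-- A's list2nid has exactly enumerate(order) as its items
theorem items_idFold (S : List Int) :
    ((gIdx S 0).foldl (fun d p => d.insert p.2 p.1) (PySem.Dict.mk [] : PySem.Dict Int Int)).items
      = PySem.List.enumerate S 0 := by
  rw [PySem.Dict.items_foldl_insert_fresh (gIdx S 0) (fun p => p.2) (fun p => p.1)
      (PySem.Dict.mk []) (fun a _ => rfl)
      (by rw [map_snd_gIdx]; exact PySem.List.nodup_pyRange_one _ _)]
  rw [swap_gIdx]
  rfl

-- B's list2nid has the same items
theorem items_enumFold (S : List Int) :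
    ((PySem.List.enumerate S).foldl (fun d p => d.insert p.1 p.2) (PySem.Dict.mk [] : PySem.Dict Int Int)).items
      = PySem.List.enumerate S 0 := by
  rw [PySem.Dict.items_foldl_insert_fresh (PySem.List.enumerate S) (fun p => p.1) (fun p => p.2)
      (PySem.Dict.mk []) (fun a _ => rfl)
      (by rw [PySem.List.map_fst_enumerate]; exact PySem.List.nodup_pyRange_one _ _)]
  simp

-- B's nid dict is literally A's nid2list dict
theorem nid_eq_n2l (S : List Int) :
    (PySem.List.enumerate S).foldl (fun d p => d.insert p.2 p.1) (PySem.Dict.mk [] : PySem.Dict Int Int)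
      = (gIdx S 0).foldl (fun d p => d.insert p.1 p.2) (PySem.Dict.mk [] : PySem.Dict Int Int) := by
  rw [← swap_gIdx, List.foldl_map]

-- looking an id up in A's list2nid returns the visited node at that position
theorem getD_l2n (S : List Int) (j : Int) (h0 : 0 ≤ j) (hj : j < (S.length : Int)) :
    ((gIdx S 0).foldl (fun d p => d.insert p.2 p.1) (PySem.Dict.mk [] : PySem.Dict Int Int)).getD j 0
      = PySem.List.pyGetD S j 0 := by
  obtain ⟨k, hk, rfl⟩ : ∃ k : Nat, k < S.length ∧ j = (k : Int) := ⟨j.toNat, by omega, by omega⟩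
  have hmem : (((k : Int)), PySem.List.pyGetD S (k : Int) 0) ∈
      ((gIdx S 0).foldl (fun d p => d.insert p.2 p.1) (PySem.Dict.mk [] : PySem.Dict Int Int)).items := by
    rw [items_idFold, PySem.List.mem_enumerate_iff]
    refine ⟨k, hk, ?_⟩
    have hg : PySem.List.pyGetD S (k : Int) 0 = S[k] := by
      rw [PySem.List.pyGetD_natCast]
      exact List.getD_eq_getElem S 0 hk
    rw [hg]
    congr 1
    omega
  have hnodup : ((gIdx S 0).foldl (fun d p => d.insert p.2 p.1) (PySem.Dict.mk [] : PySem.Dict Int Int)).keys.Nodup := by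
    have : ((gIdx S 0).foldl (fun d p => d.insert p.2 p.1) (PySem.Dict.mk [] : PySem.Dict Int Int)).keys
        = (PySem.List.enumerate S 0).map (·.1) := by
      rw [PySem.Dict.keys, items_idFold]
    rw [this, PySem.List.map_fst_enumerate]
    exact PySem.List.nodup_pyRange_one _ _
  exact PySem.Dict.getD_of_mem_items _ hmem hnodup 0

-- ===== VERDICT (by name: the statement is the Claim_ definition above) =====
theorem edist_format_py_spec : Claim_equal_edist_format_py := by
  intro adj_dict _
  unfold Spec_edist_format_py
  simp only [edist_format_py, edist_format_py_alt]
  rw [pvRootsOrder_congr ((PySem.Dict.mk adj_dict : PySem.Dict Int (List Int)).keys) _ _ _ _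
      (inv_size_eq adj_dict) (inv_contains_eq adj_dict)]
  generalize (2 ^ ((List.map (fun kv => kv.2.length) adj_dict).sum + 1) : Nat) = F
  generalize hadj : (PySem.Dict.mk adj_dict : PySem.Dict Int (List Int)) = adj
  generalize hR : pvRootsOrder adj.keys
      (List.length (PySem.Set.ofList (List.flatMap (fun kids => kids) adj.values)))
      (PySem.Set.ofList (List.flatMap (fun kids => kids) adj.values)).contains = R
  have horder : List.foldl (fun order r => bLoop adj F [[r]] order) [] R = gSeq adj F R := by
    have hfun : (fun (o : List Int) (r : Int) => bLoop adj F [[r]] o)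
        = fun o r => o ++ gVisit adj F [r] := by
      funext o r
      rw [bLoop_eq]
      simp
    rw [hfun, PySem.List.foldl_append_eq_flatMap]
    simp [gSeq]
  rw [horder, aFold_eq, nid_eq_n2l]
  dsimp only
  refine Prod.ext ?_ (Prod.ext ?_ ?_)
  · dsimp only
    rw [List.nil_append, map_snd_gIdx, zero_add]
  · dsimp only
    by_cases hRe : R.isEmpty
    · obtain rfl := List.isEmpty_iff.mp hRe
      simp [gSeq]
    · rw [if_neg (by simp [hRe])]
      rw [List.nil_append, map_snd_gIdx, zero_add]
      simp only [gAdjl]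
      have hL : ∀ j ∈ PySem.List.pyRange 0 ((gSeq adj F R).length : Int) 1,
          (List.foldl (fun d p => d.insert p.2 p.1) ({ items := [] } : PySem.Dict Int Int)
              (gIdx (gSeq adj F R) 0)).getD j 0 = PySem.List.pyGetD (gSeq adj F R) j 0 := by
        intro j hj
        rw [PySem.List.mem_pyRange_one] at hj
        exact getD_l2n (gSeq adj F R) j hj.1 hj.2
      generalize hN : List.foldl (fun d p => d.insert p.1 p.2) ({ items := [] } : PySem.Dict Int Int)
          (gIdx (gSeq adj F R) 0) = N
      generalize hS : gSeq adj F R = S at hL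
      calc (PySem.List.pyRange 0 (S.length : Int) 1).map
              (fun _id => (adj.getD ((List.foldl (fun d p => d.insert p.2 p.1) ({ items := [] } : PySem.Dict Int Int) (gIdx S 0)).getD _id 0) []).map (fun d => N.getD d 0))
          = (PySem.List.pyRange 0 (S.length : Int) 1).map
              (fun j => (adj.getD (PySem.List.pyGetD S j 0) []).map (fun d => N.getD d 0)) := by
            refine List.map_congr_left ?_
            intro j hj
            rw [hL j hj]
        _ = S.map (fun v => (adj.getD v []).map (fun c => N.getD c 0)) := by
            conv_rhs => rw [← PySem.List.map_pyGetD_pyRange_zero S 0]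
            rw [List.map_map]
            simp [Function.comp_def]
  · dsimp only
    rw [items_idFold, items_enumFold]
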